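-- pv_equiv track=rewrite | github.com/Johnybonny/aoc-25 | 06/6_2.py | translate_to_human_math
-- ===== SOURCE A (Python) =====
-- def translate_to_human_math(numbers):
-- 	longest_line = 0
-- 	for line in numbers:
-- 		if len(line) > longest_line:
-- 			longest_line = len(line)
--
-- 	all_problem_numbers = []
-- 	problem_numbers = []
-- 	for column in range(longest_line):
-- 		new_number = ""
-- 		for row in range(len(numbers)):
-- 			if column < len(numbers[row]):
-- 				new_number += numbers[row][column]
-- 		if new_number.replace(" ", "" ) != "":
-- 			problem_numbers.append(int(new_number))
-- 		else:
-- 			all_problem_numbers.append(problem_numbers)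
-- 			problem_numbers = []
-- 	all_problem_numbers.append(problem_numbers)
--
-- 	return all_problem_numbers
-- ===== SOURCE B (Python) =====
-- def translate_to_human_math(numbers):
--     # transpose the ragged grid into column strings, then group them on blank columns
--     rows = [list(line) for line in numbers]
--     cols = []
--     while any(rows):
--         cols.append("".join(row[0] for row in rows if row))
--         rows = [row[1:] for row in rows]
--     result = []
--     group = []
--     for col in cols:
--         if any(ch != " " for ch in col):
--             group.append(int(col))
--         else:
--             result.append(group)
--             group = []
--     result.append(group)
--     return result
-- ===== Notes on version B (the rewrite author's own statement) =====
-- stated objective: idiomatic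
-- what changed: B first transposes the ragged grid into the list of column strings (a peel-the-heads while-loop) and then runs one separate grouping pass over that list, instead of A's index-driven nested loops that rebuild each column by scanning all rows per column index.
import Mathlib
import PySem

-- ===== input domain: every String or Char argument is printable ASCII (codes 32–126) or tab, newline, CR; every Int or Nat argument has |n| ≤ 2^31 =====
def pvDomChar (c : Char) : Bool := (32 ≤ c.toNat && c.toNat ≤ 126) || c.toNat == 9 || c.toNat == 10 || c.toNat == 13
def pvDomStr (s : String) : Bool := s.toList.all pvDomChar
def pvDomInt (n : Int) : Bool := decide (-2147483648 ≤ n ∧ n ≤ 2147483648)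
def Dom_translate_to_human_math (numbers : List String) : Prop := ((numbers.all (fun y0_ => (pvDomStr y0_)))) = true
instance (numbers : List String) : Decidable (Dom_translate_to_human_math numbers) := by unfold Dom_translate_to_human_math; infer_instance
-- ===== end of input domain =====

-- B re-implements A as transpose-then-group (build the list of column strings first, then one
-- grouping pass over it) instead of A's index-driven nested loops; objective: idiomatic, same cost.

-- ===== PORT A =====
-- literal port of A: running max for longest_line, then for each column index a row-index loop
-- building the column string, then the append/flush branch.  int(new_number) is
-- PySem.Int.ofChars?; Pre_ below excludes exactly the inputs where it raises ValueError.
def translate_to_human_math (numbers : List String) : List (List Int) :=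
  let longest_line : Int :=
    numbers.foldl (fun acc line => if PySem.Str.len line > acc then PySem.Str.len line else acc) 0
  let p : List (List Int) × List Int :=
    (PySem.List.pyRange 0 longest_line 1).foldl (fun p column =>
      let new_number : List Char :=
        (PySem.List.pyRange 0 (PySem.List.len numbers) 1).foldl (fun s row =>
          if column < PySem.Str.len (PySem.List.pyGetD numbers row "") then
            s ++ [PySem.List.pyGetD (PySem.List.pyGetD numbers row "").toList column ' ']
          else s) []
      if PySem.Chars.replace new_number [' '] [] ≠ [] then
        (p.1, p.2 ++ [(PySem.Int.ofChars? new_number).getD 0])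
      else
        (p.1 ++ [p.2], [])) ([], [])
  p.1 ++ [p.2]

-- ===== PORT B =====
-- termination measure fact for the while-loop of B (cited by pvTransposeB's decreasing_by)
theorem pvTailsSumLt (rows : List (List Char)) (h : rows.any (fun r => !r.isEmpty) = true) :
    ((rows.map List.tail).map List.length).sum < (rows.map List.length).sum := by
  induction rows with
  | nil => simp at h
  | cons r rs ih =>
    simp only [List.any_cons, Bool.or_eq_true] at h
    have hle : ∀ l : List (List Char), ((l.map List.tail).map List.length).sum ≤ (l.map List.length).sum := by
      intro l; induction l with
      | nil => simp
      | cons a as ihl => simp only [List.map_cons, List.sum_cons, List.length_tail]; omega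
    rcases h with h | h
    · have : r ≠ [] := by simpa using h
      have : 0 < r.length := List.length_pos_iff.mpr this
      have := hle rs
      simp only [List.map_cons, List.sum_cons, List.length_tail]; omega
    · have := ih h
      simp only [List.map_cons, List.sum_cons, List.length_tail]; omega

-- B's while-loop: peel the first column (heads of the non-empty rows) while any row is non-empty
def pvTransposeB (rows : List (List Char)) : List (List Char) :=
  if h : rows.any (fun r => !r.isEmpty) = true then
    (rows.filterMap List.head?) :: pvTransposeB (rows.map List.tail)
  else []
termination_by (rows.map List.length).sum
decreasing_by simpa using pvTailsSumLt rows h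

-- literal port of B: transpose into column strings, then one grouping fold over the columns
def translate_to_human_math_alt (numbers : List String) : List (List Int) :=
  let cols := pvTransposeB (numbers.map String.toList)
  let p : List (List Int) × List Int :=
    cols.foldl (fun p col =>
      if col.any (fun ch => ch != ' ') then
        (p.1, p.2 ++ [(PySem.Int.ofChars? col).getD 0])
      else
        (p.1 ++ [p.2], [])) ([], [])
  p.1 ++ [p.2]

-- ===== PRECONDITION & SPEC =====
-- the characters of column j (rows shorter than j+1 are skipped) and the longest line length
def pvColumn (numbers : List String) (j : Nat) : List Char :=
  numbers.filterMap (fun s => s.toList[j]?)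
def pvMaxLen (numbers : List String) : Nat :=
  numbers.foldl (fun m s => max m s.toList.length) 0

-- Pre_ excludes exactly the inputs where Python A raises ValueError: a column string that
-- contains a non-space character but is not parseable by int() (e.g. "1 2" or "+").
def Pre_translate_to_human_math (numbers : List String) : Prop :=
  ∀ j, j < pvMaxLen numbers → (pvColumn numbers j).any (fun ch => ch != ' ') = true →
    (PySem.Int.ofChars? (pvColumn numbers j)).isSome = true
instance (numbers : List String) : Decidable (Pre_translate_to_human_math numbers) := by
  unfold Pre_translate_to_human_math; infer_instance

def pvWitness_translate_to_human_math : List String := ["1 2", "3 4"]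

def Spec_translate_to_human_math (numbers : List String) (out : List (List Int)) : Prop :=
  out = translate_to_human_math_alt numbers
instance (numbers : List String) (out : List (List Int)) : Decidable (Spec_translate_to_human_math numbers out) := by
  unfold Spec_translate_to_human_math; infer_instance

-- ===== CLAIM (what is proved, stated in full; the proofs are below) =====
def Claim_equal_translate_to_human_math : Prop := ∀ (numbers : List String), Dom_translate_to_human_math numbers → Pre_translate_to_human_math numbers → Spec_translate_to_human_math numbers (translate_to_human_math numbers)

-- ===== LEMMAS AND PROOFS =====

-- A's new_number.replace(" ", "") is the space-free part of the column string
theorem pvReplaceGoSpec (l acc : List Char) (fuel : Nat) (h : l.length ≤ fuel) :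
    PySem.Chars.replace.go [' '] [] fuel l acc = acc.reverse ++ l.filter (fun c => c != ' ') := by
  induction l generalizing acc fuel with
  | nil => cases fuel <;> simp [PySem.Chars.replace.go]
  | cons c t ih =>
    cases fuel with
    | zero => simp at h
    | succ n =>
      by_cases hc : c = ' '
      · have hpre : [' '].isPrefixOf (c :: t) = true := by simp [hc, List.isPrefixOf]
        simp only [PySem.Chars.replace.go, hpre, if_pos]
        simp only [List.reverse_nil, List.nil_append]
        rw [show List.drop [' '].length (c :: t) = t from rfl]
        rw [ih acc n (by simpa using h)]
        simp [hc]
      · have hpre : [' '].isPrefixOf (c :: t) = false := by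
          simp [List.isPrefixOf]; exact fun hq => hc hq.symm
        simp only [PySem.Chars.replace.go, hpre]
        rw [if_neg (by simp)]
        rw [ih (c :: acc) n (by simpa using h)]
        simp [hc]

theorem pvReplaceSpace (c : List Char) :
    PySem.Chars.replace c [' '] [] = c.filter (fun ch => ch != ' ') := by
  have : PySem.Chars.replace c [' '] [] = PySem.Chars.replace.go [' '] [] c.length c [] := by
    simp [PySem.Chars.replace]
  rw [this, pvReplaceGoSpec c [] c.length le_rfl]; simp

-- A's running max over Int is pvMaxLen
theorem pvLongestEq (numbers : List String) : ∀ m : Nat,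
    numbers.foldl (fun acc line => if PySem.Str.len line > acc then PySem.Str.len line else acc) (m : Int)
      = ((numbers.foldl (fun m s => max m s.toList.length) m : Nat) : Int) := by
  induction numbers with
  | nil => intro m; rfl
  | cons s rest ih =>
    intro m
    rw [List.foldl_cons]
    have h1 : (if PySem.Str.len s > (m : Int) then PySem.Str.len s else (m : Int))
        = ((max m s.toList.length : Nat) : Int) := by
      simp only [PySem.Str.len_eq]; split_ifs with h <;> push_cast <;> omega
    rw [h1, ih (max m s.toList.length)]
    rw [List.foldl_cons]

theorem pvLongestEq0 (numbers : List String) :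
    numbers.foldl (fun acc line => if PySem.Str.len line > acc then PySem.Str.len line else acc) (0 : Int)
      = ((pvMaxLen numbers : Nat) : Int) := by
  simpa [pvMaxLen] using pvLongestEq numbers 0

-- A's inner row loop (already reduced to a fold over numbers) builds the column string
theorem pvColFold (numbers : List String) (j : Nat) : ∀ acc : List Char,
    numbers.foldl (fun s line =>
      if (j : Int) < PySem.Str.len line then s ++ [PySem.List.pyGetD line.toList (j : Int) ' '] else s) acc
      = acc ++ pvColumn numbers j := by
  induction numbers with
  | nil => intro acc; simp [pvColumn]
  | cons s rest ih =>
    intro acc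
    rw [List.foldl_cons]
    by_cases h : j < s.toList.length
    · rw [if_pos (by rw [PySem.Str.len_eq]; exact_mod_cast h)]
      rw [ih (acc ++ [PySem.List.pyGetD s.toList (j : Int) ' '])]
      have h2 : s.toList[j]? = some (s.toList.getD j ' ') := by
        rw [List.getElem?_eq_getElem h, List.getD_eq_getElem s.toList ' ' h]
      rw [PySem.List.pyGetD_natCast]
      rw [show pvColumn (s :: rest) j = s.toList.getD j ' ' :: pvColumn rest j by
            rw [pvColumn, List.filterMap_cons, h2]; rfl]
      simp
    · rw [if_neg (by rw [PySem.Str.len_eq]; exact_mod_cast h)]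
      rw [ih acc]
      have h2 : s.toList[j]? = none := by simpa using List.getElem?_eq_none (by omega)
      rw [show pvColumn (s :: rest) j = pvColumn rest j by
            rw [pvColumn, List.filterMap_cons, h2]; rfl]

-- facts about the max line length used by the transpose characterisation
theorem pvFoldMaxTail (rows : List (List Char)) : ∀ i : Nat,
    (rows.map List.tail).foldl (fun m r => max m r.length) (i - 1)
      = rows.foldl (fun m r => max m r.length) i - 1 := by
  induction rows with
  | nil => intro i; rfl
  | cons r rs ih =>
    intro i
    simp only [List.map_cons, List.foldl_cons, List.length_tail]
    rw [show max (i - 1) (r.length - 1) = max i r.length - 1 by omega]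
    exact ih (max i r.length)

theorem pvFoldMaxZero (rows : List (List Char)) (h : rows.any (fun r => !r.isEmpty) = false) :
    rows.foldl (fun m r => max m r.length) 0 = 0 := by
  induction rows with
  | nil => rfl
  | cons r rs ih =>
    simp only [List.any_cons, Bool.or_eq_false_iff] at h
    have hr : r = [] := by simpa using h.1
    simp [hr, ih h.2]

theorem pvFoldMaxPos (rows : List (List Char)) (h : rows.any (fun r => !r.isEmpty) = true) :
    ∀ i : Nat, 0 < rows.foldl (fun m r => max m r.length) i := by
  induction rows with
  | nil => simp at h
  | cons r rs ih =>
    intro i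
    simp only [List.any_cons, Bool.or_eq_true] at h
    simp only [List.foldl_cons]
    rcases h with h | h
    · have hr : r ≠ [] := by simpa using h
      have h1 : 0 < r.length := List.length_pos_iff.mpr hr
      have h2 := (PySem.List.le_foldl_max_nat rs List.length (max i r.length)).1
      omega
    · exact ih h (max i r.length)

-- B's while-loop produces exactly the column strings, in column order
theorem pvTransposeBEqAux : ∀ (n : Nat) (rows : List (List Char)), (rows.map List.length).sum ≤ n →
    pvTransposeB rows
      = (List.range (rows.foldl (fun m r => max m r.length) 0)).map
          (fun j => rows.filterMap (fun r => r[j]?)) := by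
  intro n
  induction n with
  | zero =>
    intro rows hsum
    by_cases h : rows.any (fun r => !r.isEmpty) = true
    · exact absurd hsum (by have := pvTailsSumLt rows h; omega)
    · rw [pvTransposeB, dif_neg h, pvFoldMaxZero rows (by simpa using h)]
      simp
  | succ n ih =>
    intro rows hsum
    by_cases h : rows.any (fun r => !r.isEmpty) = true
    · rw [pvTransposeB, dif_pos h]
      have hM : 0 < rows.foldl (fun m r => max m r.length) 0 := pvFoldMaxPos rows h 0
      obtain ⟨k, hk⟩ : ∃ k, rows.foldl (fun m r => max m r.length) 0 = k + 1 :=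
        ⟨_, (Nat.succ_pred_eq_of_pos hM).symm⟩
      have htail : (rows.map List.tail).foldl (fun m r => max m r.length) 0 = k := by
        have := pvFoldMaxTail rows 0
        simp only [Nat.zero_sub] at this
        omega
      have ih' := ih (rows.map List.tail) (by have := pvTailsSumLt rows h; omega)
      rw [ih', htail, hk, List.range_succ_eq_map, List.map_cons]
      congr 1
      · simp [List.head?_eq_getElem?]
      · rw [List.map_map]
        apply List.map_congr_left
        intro j _
        simp [List.filterMap_map, List.getElem?_tail, Nat.succ_eq_add_one]
    · rw [pvTransposeB, dif_neg h, pvFoldMaxZero rows (by simpa using h)]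
      simp

-- the two grouping step functions agree on every column string
theorem pvStepEq (c : List Char) (p : List (List Int) × List Int) :
    (if PySem.Chars.replace c [' '] [] ≠ [] then
        (p.1, p.2 ++ [(PySem.Int.ofChars? c).getD 0]) else (p.1 ++ [p.2], []))
      = (if c.any (fun ch => ch != ' ') then
          (p.1, p.2 ++ [(PySem.Int.ofChars? c).getD 0]) else (p.1 ++ [p.2], [])) := by
  rw [pvReplaceSpace]
  by_cases h : c.any (fun ch => ch != ' ') = true
  · rw [if_pos h, if_pos]
    simp only [List.any_eq_true, bne_iff_ne] at h
    obtain ⟨x, hx, hne⟩ := h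
    intro hnil
    exact (List.filter_eq_nil_iff.mp hnil x hx) (by simpa using hne)
  · rw [if_neg h, if_neg]
    simp only [List.any_eq_true, bne_iff_ne] at h
    push_neg at h
    simp only [ne_eq, not_not]
    exact List.filter_eq_nil_iff.mpr (fun a ha => by simpa using h a ha)

-- ===== VERDICT (by name: the statement is the Claim_ definition above) =====
theorem translate_to_human_math_spec : Claim_equal_translate_to_human_math := by
  intro numbers _ _
  show translate_to_human_math numbers = translate_to_human_math_alt numbers
  simp only [translate_to_human_math, translate_to_human_math_alt]
  rw [pvLongestEq0 numbers]
  rw [pvTransposeBEqAux ((numbers.map String.toList).map List.length).sum (numbers.map String.toList) le_rfl]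
  rw [show (numbers.map String.toList).foldl (fun m r => max m r.length) 0
        = pvMaxLen numbers by simp [pvMaxLen, List.foldl_map]]
  rw [PySem.List.pyRange_one 0 (pvMaxLen numbers : Int)]
  simp only [Int.sub_zero, Int.toNat_natCast, zero_add, List.foldl_map]
  refine congrArg (fun q : List (List Int) × List Int => q.1 ++ [q.2]) ?_
  apply PySem.List.foldl_congr_mem
  intro p j _
  rw [PySem.List.foldl_pyRange_zero_pyGetD numbers ""
        (fun s line => if (j : Int) < PySem.Str.len line then
            s ++ [PySem.List.pyGetD line.toList (j : Int) ' '] else s) []]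
  rw [pvColFold numbers j []]
  rw [List.nil_append]
  rw [show (numbers.map String.toList).filterMap (fun r => r[j]?) = pvColumn numbers j by
        simp [List.filterMap_map, pvColumn]]
  exact pvStepEq (pvColumn numbers j) p
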